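-- pv_equiv track=rewrite | github.com/Revisto/drum-machine | src/services/drum_part_manager.py | _compute_next_midi_note
-- ===== SOURCE A (Python) =====
-- from typing import List, Optional, Dict
--
-- def _compute_next_midi_note(used_notes: set) -> Optional[int]:
--     """Compute the next available MIDI note given a set of used notes"""
--     # Start from 35 (GM percussion range start) for better compatibility
--     # GM percussion standard is 35-81, but we check up to 127 for flexibility
--     for note in range(35, 128):
--         if note not in used_notes:
--             return note
--
--     # If we run out of standard percussion notes, check lower range (0-34)
--     for note in range(0, 35):
--         if note not in used_notes:
--             return note
--
--     return None
-- ===== SOURCE B (Python) =====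
-- from typing import Optional
--
-- def _compute_next_midi_note(used_notes: set) -> Optional[int]:
--     """Compute the next available MIDI note given a set of used notes"""
--     # Sort the in-band used notes and walk the contiguous run starting at the
--     # band base; the first gap after that run is the smallest free note.
--     for lo, hi in ((35, 128), (0, 35)):
--         cand = lo
--         for n in sorted(set(m for m in used_notes if lo <= m < hi)):
--             if n != cand:
--                 break
--             cand += 1
--         if cand < hi:
--             return cand
--     return None
-- ===== Notes on version B (the rewrite author's own statement) =====
-- stated objective: alternative
-- what changed: Instead of scanning every candidate note in 35-127 then 0-34 for the first one missing from the set, B sorts the used notes falling in each band and walks the contiguous run starting at the band base; the first gap after that run is the answer.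
import Mathlib
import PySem

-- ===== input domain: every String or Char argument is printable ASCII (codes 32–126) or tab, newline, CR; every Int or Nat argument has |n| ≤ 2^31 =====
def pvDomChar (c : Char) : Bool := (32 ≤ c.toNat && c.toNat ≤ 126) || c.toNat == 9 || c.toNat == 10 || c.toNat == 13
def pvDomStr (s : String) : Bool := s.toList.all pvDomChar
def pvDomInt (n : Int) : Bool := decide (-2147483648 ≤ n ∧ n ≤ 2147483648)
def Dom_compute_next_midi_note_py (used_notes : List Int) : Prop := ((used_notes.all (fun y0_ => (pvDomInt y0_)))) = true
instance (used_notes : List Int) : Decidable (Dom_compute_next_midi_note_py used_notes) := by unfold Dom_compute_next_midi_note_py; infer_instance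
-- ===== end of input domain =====

-- B replaces A's first-miss scan over every candidate note by sorting the used notes of
-- each band and walking the contiguous run from the band base (objective: alternative).

-- ===== PORT A =====
-- 'for note in range(35,128): if note not in used_notes: return note', then range(0,35), else None
def compute_next_midi_note_py (used_notes : List Int) : Option Int :=
  match (PySem.List.pyRange 35 128 1).find? (fun note => !used_notes.contains note) with
  | some note => some note
  | none =>
    match (PySem.List.pyRange 0 35 1).find? (fun note => !used_notes.contains note) with
    | some note => some note
    | none => none

-- ===== PORT B =====
-- inner 'for n in sorted(...): if n != cand: break; cand += 1'
def pvWalk : Int → List Int → Int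
  | cand, [] => cand
  | cand, n :: t => if n ≠ cand then cand else pvWalk (cand + 1) t

-- one iteration of B's band loop: sorted in-band used notes, walk, return cand if cand < hi
def pvBand (used_notes : List Int) (lo hi : Int) : Option Int :=
  let s := PySem.List.sorted
      (PySem.Set.ofList (used_notes.filter (fun m => decide (lo ≤ m) && decide (m < hi))))
      (fun x => x) false
  let cand := pvWalk lo s
  if cand < hi then some cand else none

def compute_next_midi_note_py_alt (used_notes : List Int) : Option Int :=
  match pvBand used_notes 35 128 with
  | some c => some c
  | none => pvBand used_notes 0 35

-- ===== PRECONDITION & SPEC =====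
def Spec_compute_next_midi_note_py (used_notes : List Int) (out : Option Int) : Prop := out = compute_next_midi_note_py_alt used_notes
instance (used_notes : List Int) (out : Option Int) : Decidable (Spec_compute_next_midi_note_py used_notes out) := by unfold Spec_compute_next_midi_note_py; infer_instance

-- ===== CLAIM (what is proved, stated in full; the proofs are below) =====
def Claim_equal_compute_next_midi_note_py : Prop := ∀ (used_notes : List Int), Dom_compute_next_midi_note_py used_notes → Spec_compute_next_midi_note_py used_notes (compute_next_midi_note_py used_notes)

-- ===== LEMMAS AND PROOFS =====

-- the first note of [lo, lo+k) missing from 'used' is where the sorted in-band walk stops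
lemma find_eq_walk (k : Nat) : ∀ (lo : Int) (used s : List Int),
    s.Pairwise (· < ·) →
    (∀ n ∈ s, lo ≤ n ∧ n < lo + k) →
    (∀ m : Int, lo ≤ m → m < lo + k → (used.contains m = true ↔ m ∈ s)) →
    (PySem.List.pyRange lo (lo + k) 1).find? (fun note => !used.contains note)
      = if pvWalk lo s < lo + k then some (pvWalk lo s) else none := by
  induction k with
  | zero =>
    intro lo used s _ hband _
    have hs : s = [] := by
      cases s with
      | nil => rfl
      | cons a t => exact absurd (hband a (by simp)) (by omega)
    subst hs
    simp [pvWalk]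
  | succ k ih =>
    intro lo used s hpw hband hiff
    have hlt : lo < lo + ((k:Nat)+1:Nat) := by push_cast; omega
    rw [PySem.List.pyRange_one_cons hlt]
    cases s with
    | nil =>
      have hc : lo ∉ used := by
        intro h
        have := (hiff lo le_rfl hlt).mp (by simpa using h)
        simp at this
      simp [hc, pvWalk]
    | cons n t =>
      rcases List.pairwise_cons.mp hpw with ⟨hnt, hpt⟩
      by_cases hn : n = lo
      · -- head of the sorted list is exactly the base: lo is used, skip it on both sides
        subst hn
        have hc : used.contains n = true := (hiff n le_rfl hlt).mpr (by simp)
        have hrange : PySem.List.pyRange (n+1) (n + ((k:Nat)+1:Nat)) 1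
            = PySem.List.pyRange (n+1) ((n+1) + (k:Nat)) 1 := by
          congr 1; push_cast; ring
        have hwalk : pvWalk n (n :: t) = pvWalk (n+1) t := by simp [pvWalk]
        have hstep := ih (n+1) used t hpt
          (fun m hm => ⟨by have := hnt m hm; omega,
                        by have := (hband m (by simp [hm])).2; push_cast at *; omega⟩)
          (fun m h1 h2 => by
            have h2' : m < n + ((k:Nat)+1:Nat) := by push_cast at *; omega
            rw [hiff m (by omega) h2']
            simp only [List.mem_cons]
            constructor
            · rintro (rfl | h)
              · omega
              · exact h
            · exact fun h => Or.inr h)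
        rw [List.find?_cons, hc]
        simp only [Bool.not_true]
        rw [hrange, hstep, hwalk]
        have : (n+1) + (k:Nat) = n + ((k:Nat)+1:Nat) := by push_cast; ring
        rw [this]
      · -- head exceeds the base: lo is free; both sides return lo
        have hlo : lo ∉ n :: t := by
          simp only [List.mem_cons]
          rintro (rfl | h)
          · exact hn rfl
          · have h1 := hnt lo h
            have h2 := (hband n (by simp)).1
            omega
        have hc : lo ∉ used := by
          intro h
          exact hlo ((hiff lo le_rfl hlt).mp (by simpa using h))
        have hw : pvWalk lo (n :: t) = lo := by simp [pvWalk, hn]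
        simp [hc, hw]

-- instantiate find_eq_walk for one band of B
lemma find_eq_pvBand (used : List Int) (lo : Int) (k : Nat) :
    (PySem.List.pyRange lo (lo + k) 1).find? (fun note => !used.contains note)
      = pvBand used lo (lo + k) := by
  unfold pvBand
  set s := PySem.List.sorted
      (PySem.Set.ofList (used.filter (fun m => decide (lo ≤ m) && decide (m < lo + k))))
      (fun x => x) false with hs
  have hmem : ∀ m : Int, m ∈ s ↔ m ∈ used ∧ lo ≤ m ∧ m < lo + k := by
    intro m
    rw [hs, PySem.List.mem_sorted, PySem.Set.mem_ofList, List.mem_filter]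
    simp
  refine find_eq_walk k lo used s ?_ ?_ ?_
  · exact PySem.List.sorted_ofList_pairwise_lt _
  · exact fun n hn => ((hmem n).mp hn).2
  · intro m h1 h2
    rw [hmem]
    simp [h1, h2]

-- ===== VERDICT (by name: the statement is the Claim_ definition above) =====
theorem compute_next_midi_note_py_spec : Claim_equal_compute_next_midi_note_py := by
  intro used_notes _
  unfold Spec_compute_next_midi_note_py compute_next_midi_note_py compute_next_midi_note_py_alt
  have h1 := find_eq_pvBand used_notes 35 93
  have h2 := find_eq_pvBand used_notes 0 35
  have e1 : (35:Int) + (93:Nat) = 128 := by norm_num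
  have e2 : (0:Int) + (35:Nat) = 35 := by norm_num
  rw [e1] at h1; rw [e2] at h2
  rw [h1, h2]
  cases pvBand used_notes 35 128 with
  | some c => simp
  | none => cases pvBand used_notes 0 35 <;> simp
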